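-- pv_equiv track=rewrite | github.com/TaeHyoungKwon/Codewars | Baekjoon Online Judge/탁구_경기.py | solution
-- ===== SOURCE A (Python) =====
-- def solution(winner_results: list[str]) -> str:
--     dalgu_win_count = 0
--     ponix_win_count = 0
--
--     for winner in winner_results:
--         if winner == "D":
--             dalgu_win_count += 1
--         else:
--             ponix_win_count += 1
--
--         if abs(dalgu_win_count - ponix_win_count) == 2:
--             break
--
--     return f"{dalgu_win_count}:{ponix_win_count}"
-- ===== SOURCE B (Python) =====
-- def solution(winner_results: list[str]) -> str:
--     # Pass 1: find the 1-based cutoff where the running lead first reaches 2.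
--     cutoff = len(winner_results)
--     diff = 0
--     for i, w in enumerate(winner_results):
--         diff += 1 if w == "D" else -1
--         if abs(diff) == 2:
--             cutoff = i + 1
--             break
--     # Pass 2: tabulate the played prefix.
--     prefix = winner_results[:cutoff]
--     d = prefix.count("D")
--     return f"{d}:{len(prefix) - d}"
-- ===== Notes on version B (the rewrite author's own statement) =====
-- stated objective: alternative
-- what changed: Replaced the single count-and-break loop over two counters by a two-pass scheme: first find the cutoff index where the signed lead first reaches 2 (tracking one signed difference), then tabulate the prefix with count() and a subtraction.
import Mathlib
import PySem

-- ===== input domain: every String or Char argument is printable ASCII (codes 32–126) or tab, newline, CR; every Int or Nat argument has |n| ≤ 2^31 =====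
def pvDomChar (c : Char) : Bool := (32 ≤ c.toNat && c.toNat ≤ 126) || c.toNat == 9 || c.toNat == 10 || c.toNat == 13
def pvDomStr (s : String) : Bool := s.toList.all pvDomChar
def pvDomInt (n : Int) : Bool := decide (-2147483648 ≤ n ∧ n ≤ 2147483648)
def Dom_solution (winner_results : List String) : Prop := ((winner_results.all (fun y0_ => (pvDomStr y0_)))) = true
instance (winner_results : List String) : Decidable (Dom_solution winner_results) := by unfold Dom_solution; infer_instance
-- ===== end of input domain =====

-- B changes the decomposition: a boundary-finding pass over one signed difference, then a
-- separate tabulation of the prefix (same cost; objective: alternative).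

-- ===== PORT A =====
-- A's single loop over two counters, breaking when the absolute gap is 2.
def solutionGo : List String → Int → Int → String
  | [], d, p => PySem.Int.toStr d ++ ":" ++ PySem.Int.toStr p
  | w :: ws, d, p =>
    let d' := if w == "D" then d + 1 else d
    let p' := if w == "D" then p else p + 1
    if (d' - p').natAbs = 2 then PySem.Int.toStr d' ++ ":" ++ PySem.Int.toStr p'
    else solutionGo ws d' p'

def solution (winner_results : List String) : String :=
  solutionGo winner_results 0 0

-- ===== PORT B =====
-- Pass 1 of B: 1-based index where |running diff| first hits 2, or the full length.
def solutionCut : List String → Int → Nat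
  | [], _ => 0
  | w :: ws, diff =>
    let diff' := diff + (if w == "D" then 1 else -1)
    if diff'.natAbs = 2 then 1 else 1 + solutionCut ws diff'

def solution_alt (winner_results : List String) : String :=
  let pre := winner_results.take (solutionCut winner_results 0)
  let d := pre.count "D"
  PySem.Int.toStr (d : Int) ++ ":" ++ PySem.Int.toStr ((pre.length - d : Nat) : Int)

-- ===== PRECONDITION & SPEC =====
def Spec_solution (winner_results : List String) (out : String) : Prop := out = solution_alt winner_results
instance (winner_results : List String) (out : String) : Decidable (Spec_solution winner_results out) := by unfold Spec_solution; infer_instance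

-- ===== CLAIM (what is proved, stated in full; the proofs are below) =====
def Claim_equal_solution : Prop := ∀ (winner_results : List String), Dom_solution winner_results → Spec_solution winner_results (solution winner_results)

-- ===== LEMMAS AND PROOFS =====

-- Invariant: A's loop from counters (d, p) formats the counters advanced over exactly the
-- prefix that B's cutoff (started at the current difference d - p) selects.
theorem solutionGo_eq (ws : List String) : ∀ (d p : Int),
    solutionGo ws d p =
      PySem.Int.toStr (d + ((ws.take (solutionCut ws (d - p))).count "D" : Int)) ++ ":" ++
      PySem.Int.toStr (p + ((ws.take (solutionCut ws (d - p))).length : Int)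
        - ((ws.take (solutionCut ws (d - p))).count "D" : Int)) := by
  induction ws with
  | nil =>
    intro d p
    simp [solutionGo, solutionCut]
  | cons w ws ih =>
    intro d p
    by_cases hD : (w == "D") = true
    · by_cases habs : (d + 1 - p).natAbs = 2
      · have hc : solutionCut (w :: ws) (d - p) = 1 := by
          simp only [solutionCut, hD, reduceIte]
          have : d - p + 1 = d + 1 - p := by ring
          rw [this, if_pos habs]
        simp only [solutionGo, hD, if_true, if_pos habs, hc, List.take_succ_cons,
          List.take_zero, List.count_cons, List.count_nil, hD, List.length_cons,
          List.length_nil]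
        congr 2 <;> omega
      · have hc : solutionCut (w :: ws) (d - p) = 1 + solutionCut ws (d + 1 - p) := by
          simp only [solutionCut, hD, reduceIte]
          have : d - p + 1 = d + 1 - p := by ring
          rw [this, if_neg habs]
        simp only [solutionGo, hD, if_true, if_neg habs, hc]
        rw [ih (d + 1) p]
        have hArg : d + 1 - p = (d + 1) - p := by ring
        simp only [hArg, Nat.add_comm 1 (solutionCut ws (d + 1 - p)), List.take_succ_cons,
          List.count_cons, hD, List.length_cons]
        congr 2 <;> push_cast <;> ring
    · have hD' : (w == "D") = false := by simpa using hD
      by_cases habs : (d - (p + 1)).natAbs = 2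
      · have hc : solutionCut (w :: ws) (d - p) = 1 := by
          simp only [solutionCut, hD', Bool.false_eq_true, reduceIte]
          have : d - p + -1 = d - (p + 1) := by ring
          rw [this, if_pos habs]
        simp only [solutionGo, hD', Bool.false_eq_true, if_false, if_pos habs, hc,
          List.take_succ_cons, List.take_zero, List.count_cons, List.count_nil,
          List.length_cons, List.length_nil]
        congr 2 <;> simp [hD'] <;> omega
      · have hc : solutionCut (w :: ws) (d - p) = 1 + solutionCut ws (d - (p + 1)) := by
          simp only [solutionCut, hD', Bool.false_eq_true, reduceIte]
          have : d - p + -1 = d - (p + 1) := by ring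
          rw [this, if_neg habs]
        simp only [solutionGo, hD', Bool.false_eq_true, if_false, if_neg habs, hc]
        rw [ih d (p + 1)]
        simp only [Nat.add_comm 1 (solutionCut ws (d - (p + 1))), List.take_succ_cons,
          List.count_cons, hD', List.length_cons]
        congr 2 <;> push_cast [hD'] <;> ring

-- ===== VERDICT (by name: the statement is the Claim_ definition above) =====
theorem solution_spec : Claim_equal_solution := by
  intro ws _
  unfold Spec_solution solution solution_alt
  rw [solutionGo_eq ws 0 0]
  have h0 : (0 : Int) - 0 = 0 := by ring
  rw [h0]
  have hle : (ws.take (solutionCut ws 0)).count "D" ≤ (ws.take (solutionCut ws 0)).length :=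
    List.count_le_length
  have h1 : (0 : Int) + ((ws.take (solutionCut ws 0)).count "D" : Int)
      = (((ws.take (solutionCut ws 0)).count "D" : Nat) : Int) := by omega
  have h2 : (0 : Int) + ((ws.take (solutionCut ws 0)).length : Int)
        - ((ws.take (solutionCut ws 0)).count "D" : Int)
      = (((ws.take (solutionCut ws 0)).length - (ws.take (solutionCut ws 0)).count "D" : Nat) : Int) := by
    omega
  rw [h1, h2]
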